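-- pv_equiv track=rewrite | github.com/szidanne/advent-of-code-2025 | day7/common.py | count_quantum_timelines
-- ===== SOURCE A (Python) =====
-- def find_start(grid):
--     """
--     find the (row, col) of 'S'
--     """
--     for r in range(len(grid)):
--         for c in range(len(grid[0])):
--             if grid[r][c] == "S":
--                 return r, c
--     raise ValueError("No start S found")
--
-- def count_quantum_timelines(grid):
--     R = len(grid)
--     C = len(grid[0])
--
--     start_r, start_c = find_start(grid)
--
--     # precompute splitter columns per row
--     splitter_cols_by_row = [[] for _ in range(R)]
--     for r in range(R):
--         row = grid[r]
--         cols = []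
--         for c in range(C):
--             if row[c] == "^":
--                 cols.append(c)
--         splitter_cols_by_row[r] = cols
--
--     ways = [0] * C
--     ways[start_c] = 1
--
--     finished = 0
--     last_col = C - 1
--
--     # process rows below S
--     for r in range(start_r + 1, R):
--         cols = splitter_cols_by_row[r]
--         if not cols:
--             # no splitters => ways unchanged
--             continue
--
--         # start with "everything goes straight down" (fast C-level copy)
--         new = ways.copy()
--         w = ways
--
--         # only adjust at splitter columns
--         for c in cols:
--             amt = w[c]
--             if amt == 0:
--                 continue
--
--             # remove straight-down at the splitter
--             new[c] -= amt
--
--             # left branch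
--             if c > 0:
--                 new[c - 1] += amt
--             else:
--                 finished += amt
--
--             # right branch
--             if c < last_col:
--                 new[c + 1] += amt
--             else:
--                 finished += amt
--
--         ways = new
--
--     return finished + sum(ways)
-- ===== SOURCE B (Python) =====
-- def find_start(grid):
--     """
--     find the (row, col) of 'S'
--     """
--     for r in range(len(grid)):
--         for c in range(len(grid[0])):
--             if grid[r][c] == "S":
--                 return r, c
--     raise ValueError("No start S found")
--
--
-- def count_quantum_timelines(grid):
--     # Gather form: each new cell pulls its value from the cells that feed it,
--     # instead of A's scatter of deltas from each splitter column.
--     R = len(grid)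
--     C = len(grid[0])
--     start_r, start_c = find_start(grid)
--
--     ways = [1 if j == start_c else 0 for j in range(C)]
--     finished = 0
--
--     for r in range(start_r + 1, R):
--         row = grid[r]
--         finished += (ways[0] if row[0] == "^" else 0)
--         finished += (ways[C - 1] if row[C - 1] == "^" else 0)
--         ways = [
--             (0 if row[j] == "^" else ways[j])
--             + (ways[j - 1] if j > 0 and row[j - 1] == "^" else 0)
--             + (ways[j + 1] if j + 1 < C and row[j + 1] == "^" else 0)
--             for j in range(C)
--         ]
--
--     return finished + sum(ways)
-- ===== Notes on version B (the rewrite author's own statement) =====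
-- stated objective: alternative
-- what changed: A scatters in-place deltas from each precomputed splitter column into a copy of the column vector (and skips splitter-free rows); B recomputes each row's vector with a per-cell gather comprehension that pulls each cell's count from the cells feeding it (straight above, upper-left splitter, upper-right splitter), with boundary splitters added to finished directly.
import Mathlib
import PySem

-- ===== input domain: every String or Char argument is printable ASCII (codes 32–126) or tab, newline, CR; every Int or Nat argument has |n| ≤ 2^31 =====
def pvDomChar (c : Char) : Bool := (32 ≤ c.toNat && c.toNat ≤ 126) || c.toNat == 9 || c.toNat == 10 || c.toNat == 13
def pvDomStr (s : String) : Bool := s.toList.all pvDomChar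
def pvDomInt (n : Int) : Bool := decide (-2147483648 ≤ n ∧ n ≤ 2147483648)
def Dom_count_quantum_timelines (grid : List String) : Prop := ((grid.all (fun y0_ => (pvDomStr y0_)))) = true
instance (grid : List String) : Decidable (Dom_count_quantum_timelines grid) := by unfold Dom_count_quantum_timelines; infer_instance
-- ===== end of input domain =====

-- B replaces A's scatter of in-place deltas from each precomputed splitter column by a
-- per-cell gather comprehension (each new cell pulls from the cells that feed it);
-- alternative decomposition, same cost.

-- ===== PORT A =====
-- Python 'return' inside a for loop: once a result is found it is kept
def pvFirst {β : Type} (acc : Option β) (y : Option β) : Option β :=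
  match acc with
  | some p => some p
  | none => y

-- shared helper find_start (the same code verbatim in Source A and in Source B).  Returns none
-- where Python raises (ValueError: no 'S'); that case is excluded by Pre_ below.
-- grid[r][c] is ported with pyGetD: in range on every input admitted by Pre_.
def pvFindStart (grid : List String) : Option (Int × Int) :=
  (PySem.List.pyRange 0 (grid.length : Int) 1).foldl (fun acc r =>
    pvFirst acc
      ((PySem.List.pyRange 0 (((PySem.List.pyGetD grid 0 "").toList.length : Int)) 1).foldl
        (fun acc2 c =>
          pvFirst acc2
            (if PySem.List.pyGetD (PySem.List.pyGetD grid r "").toList c ' ' = 'S' then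
              some (r, c)
            else none)) none)) none

-- inner loop building `cols` for one row (append at splitter columns)
def pvColsOf (row : List Char) (C : Int) : List Int :=
  (PySem.List.pyRange 0 C 1).foldl
    (fun cols c => if PySem.List.pyGetD row c ' ' = '^' then cols ++ [c] else cols) []

-- body of A's inner `for c in cols` loop; `w` is the row-entry vector `ways`
def pvApplyCol (C : Int) (w : List Int) (st : Int × List Int) (c : Int) : Int × List Int :=
  let amt := PySem.List.pyGetD w c 0
  if amt = 0 then st
  else
    let nw := PySem.List.pySetD st.2 c (PySem.List.pyGetD st.2 c 0 - amt)
    let p :=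
      if 0 < c then (st.1, PySem.List.pySetD nw (c - 1) (PySem.List.pyGetD nw (c - 1) 0 + amt))
      else (st.1 + amt, nw)
    if c < C - 1 then (p.1, PySem.List.pySetD p.2 (c + 1) (PySem.List.pyGetD p.2 (c + 1) 0 + amt))
    else (p.1 + amt, p.2)

-- body of A's `for r in range(start_r + 1, R)` loop; state = (finished, ways)
def pvRowStepA (C : Int) (spl : List (List Int)) (st : Int × List Int) (r : Int) :
    Int × List Int :=
  let cols := PySem.List.pyGetD spl r []
  if cols.isEmpty then st
  else cols.foldl (pvApplyCol C st.2) st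

def count_quantum_timelines (grid : List String) : Int :=
  let R : Int := (grid.length : Int)
  let C : Int := ((PySem.List.pyGetD grid 0 "").toList.length : Int)  -- len(grid[0]); grid ≠ [] under Pre_
  match pvFindStart grid with
  | none => 0   -- Python raises ValueError here; excluded by Pre_
  | some (sr, sc) =>
    let spl : List (List Int) :=
      (PySem.List.pyRange 0 R 1).foldl
        (fun acc r => acc ++ [pvColsOf (PySem.List.pyGetD grid r "").toList C]) []
    let ways := PySem.List.pySetD (PySem.List.pyRepeat [(0 : Int)] C) sc 1
    let res := (PySem.List.pyRange (sr + 1) R 1).foldl (pvRowStepA C spl) (0, ways)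
    res.1 + res.2.sum

-- ===== PORT B =====
-- gather step: each new cell pulls from straight-above / upper-left / upper-right
def pvGatherStep (C : Int) (row : List Char) (st : Int × List Int) : Int × List Int :=
  let ways := st.2
  let f1 := st.1 + (if PySem.List.pyGetD row 0 ' ' = '^' then PySem.List.pyGetD ways 0 0 else 0)
  let f2 := f1 +
    (if PySem.List.pyGetD row (C - 1) ' ' = '^' then PySem.List.pyGetD ways (C - 1) 0 else 0)
  (f2,
    (PySem.List.pyRange 0 C 1).map (fun j =>
      (if PySem.List.pyGetD row j ' ' = '^' then 0 else PySem.List.pyGetD ways j 0)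
      + (if 0 < j ∧ PySem.List.pyGetD row (j - 1) ' ' = '^' then PySem.List.pyGetD ways (j - 1) 0
         else 0)
      + (if j + 1 < C ∧ PySem.List.pyGetD row (j + 1) ' ' = '^' then PySem.List.pyGetD ways (j + 1) 0
         else 0)))

def pvRowStepB (grid : List String) (C : Int) (st : Int × List Int) (r : Int) : Int × List Int :=
  pvGatherStep C (PySem.List.pyGetD grid r "").toList st

def count_quantum_timelines_alt (grid : List String) : Int :=
  let R : Int := (grid.length : Int)
  let C : Int := ((PySem.List.pyGetD grid 0 "").toList.length : Int)
  match pvFindStart grid with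
  | none => 0
  | some (sr, sc) =>
    let ways := (PySem.List.pyRange 0 C 1).map (fun j => if j = sc then (1 : Int) else 0)
    let res := (PySem.List.pyRange (sr + 1) R 1).foldl (pvRowStepB grid C) (0, ways)
    res.1 + res.2.sum

-- ===== PRECONDITION & SPEC =====
-- Pre_: exactly where the Python A returns normally: grid nonempty, every row at least
-- as long as row 0 (else IndexError in find_start or the splitter precompute), and an
-- 'S' somewhere in the first len(grid[0]) columns (else ValueError from find_start).
def Pre_count_quantum_timelines (grid : List String) : Prop :=
  grid ≠ [] ∧
  (∀ s ∈ grid, (grid.headD "").toList.length ≤ s.toList.length) ∧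
  (∃ s ∈ grid, 'S' ∈ s.toList.take (grid.headD "").toList.length)
instance (grid : List String) : Decidable (Pre_count_quantum_timelines grid) := by
  unfold Pre_count_quantum_timelines; infer_instance

def pvWitness_count_quantum_timelines : List String := ["^.^", ".S.", "^^^", "..."]

def Spec_count_quantum_timelines (grid : List String) (out : Int) : Prop := out = count_quantum_timelines_alt grid
instance (grid : List String) (out : Int) : Decidable (Spec_count_quantum_timelines grid out) := by unfold Spec_count_quantum_timelines; infer_instance

-- ===== CLAIM (what is proved, stated in full; the proofs are below) =====
def Claim_equal_count_quantum_timelines : Prop := ∀ (grid : List String), Dom_count_quantum_timelines grid → Pre_count_quantum_timelines grid → Spec_count_quantum_timelines grid (count_quantum_timelines grid)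

-- ===== LEMMAS AND PROOFS =====

theorem pv_foldl_pvFirst_some {α β : Type} (l : List α) (g : α → Option β) (p : β) :
    l.foldl (fun acc x => pvFirst acc (g x)) (some p) = some p := by
  induction l with
  | nil => rfl
  | cons h t ih => simpa [pvFirst] using ih

theorem pv_foldl_pvFirst_eq_some {α β : Type} (l : List α) (g : α → Option β) (p : β)
    (h : l.foldl (fun acc x => pvFirst acc (g x)) none = some p) :
    ∃ x ∈ l, g x = some p := by
  induction l with
  | nil => simp at h
  | cons hd tl ih =>
    rw [List.foldl_cons] at h
    cases hgx : g hd with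
    | some q =>
      rw [show pvFirst none (g hd) = some q by simp [pvFirst, hgx],
        pv_foldl_pvFirst_some] at h
      exact ⟨hd, List.mem_cons_self, by rw [hgx, h]⟩
    | none =>
      rw [show pvFirst none (g hd) = none by simp [pvFirst, hgx]] at h
      obtain ⟨x, hx, hgx2⟩ := ih h
      exact ⟨x, List.mem_cons_of_mem _ hx, hgx2⟩

theorem pvFindStart_bounds (grid : List String) (sr sc : Int)
    (h : pvFindStart grid = some (sr, sc)) :
    0 ≤ sr ∧ sr < (grid.length : Int) ∧ 0 ≤ sc ∧
      sc < ((PySem.List.pyGetD grid 0 "").toList.length : Int) := by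
  unfold pvFindStart at h
  obtain ⟨r, hr, h2⟩ := pv_foldl_pvFirst_eq_some _ _ _ h
  obtain ⟨c, hc, h3⟩ := pv_foldl_pvFirst_eq_some _ _ _ h2
  rw [PySem.List.mem_pyRange_one] at hr hc
  split at h3
  · obtain ⟨rfl, rfl⟩ : r = sr ∧ c = sc := by
      constructor <;> (cases h3; rfl)
    exact ⟨hr.1, hr.2, hc.1, hc.2⟩
  · cases h3

-- `cols` for one row is a filter of the column range
theorem pvColsOf_eq_filter (row : List Char) (C : Int) :
    pvColsOf row C =
      (PySem.List.pyRange 0 C 1).filter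
        (fun c => decide (PySem.List.pyGetD row c ' ' = '^')) := by
  unfold pvColsOf
  rw [PySem.List.foldl_append_ite_eq_filter]
  rfl

theorem mem_pvColsOf (row : List Char) (C : Int) (c : Int) :
    c ∈ pvColsOf row C ↔ 0 ≤ c ∧ c < C ∧ PySem.List.pyGetD row c ' ' = '^' := by
  simp [pvColsOf_eq_filter, List.mem_filter, PySem.List.mem_pyRange_one]
  tauto

theorem nodup_pvColsOf (row : List Char) (C : Int) : (pvColsOf row C).Nodup := by
  rw [pvColsOf_eq_filter]
  exact (PySem.List.nodup_pyRange_one 0 C).filter _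

-- get-after-set, Int indices
theorem pv_pyGetD_pySetD (xs : List Int) (i j v : Int) (hi : 0 ≤ i) (hin : i.toNat < xs.length)
    (hj : 0 ≤ j) :
    PySem.List.pyGetD (PySem.List.pySetD xs i v) j 0 =
      if j = i then v else PySem.List.pyGetD xs j 0 := by
  rw [PySem.List.pySetD_of_nonneg _ _ hi, PySem.List.pyGetD_of_nonneg _ _ hj,
    PySem.List.pyGetD_of_nonneg _ _ hj, List.getD_eq_getElem?_getD, List.getD_eq_getElem?_getD,
    List.getElem?_set]
  by_cases hji : j = i
  · subst hji; simp [hin]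
  · have : ¬ (i.toNat = j.toNat) := by omega
    simp [this, hji]

-- finished-delta and ways-delta contributed by one splitter column c
def pvAmt (w : List Int) (c : Int) : Int := PySem.List.pyGetD w c 0
def pvB (C : Int) (w : List Int) (c : Int) : Int :=
  (if c = 0 then pvAmt w c else 0) + (if c = C - 1 then pvAmt w c else 0)
def pvD (C : Int) (w : List Int) (j c : Int) : Int :=
  (if c = j then -pvAmt w c else 0) + (if 0 < c ∧ c - 1 = j then pvAmt w c else 0)
    + (if c < C - 1 ∧ c + 1 = j then pvAmt w c else 0)

theorem pvApplyCol_spec (C : Int) (w : List Int) (st : Int × List Int) (c : Int)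
    (hc : 0 ≤ c ∧ c < C) (hlen : st.2.length = C.toNat) :
    (pvApplyCol C w st c).1 = st.1 + pvB C w c ∧
    (pvApplyCol C w st c).2.length = C.toNat ∧
    ∀ j : Int, 0 ≤ j →
      PySem.List.pyGetD (pvApplyCol C w st c).2 j 0 =
        PySem.List.pyGetD st.2 j 0 + pvD C w j c := by
  obtain ⟨hc0, hcC⟩ := hc
  by_cases hamt : PySem.List.pyGetD w c 0 = 0
  · simp only [pvApplyCol, hamt]
    refine ⟨by simp [pvB, pvAmt, hamt], hlen, ?_⟩
    intro j hj; simp [pvD, pvAmt, hamt]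
  · have hcl : c.toNat < st.2.length := by omega
    have hcl1 : (c - 1).toNat < st.2.length := by omega
    have hcl2 : c < C - 1 → (c + 1).toNat < st.2.length := by omega
    simp only [pvApplyCol, if_neg hamt]
    by_cases hpos : 0 < c <;> by_cases hlast : c < C - 1 <;>
      simp only [hpos, hlast, ite_true, ite_false]
    · refine ⟨by simp only [pvB, pvAmt]; rw [if_neg (by omega), if_neg (by omega)]; ring,
        by simp [PySem.List.length_pySetD, hlen], ?_⟩
      intro j hj
      rw [pv_pyGetD_pySetD _ _ _ _ (by omega) (by rw [PySem.List.length_pySetD, PySem.List.length_pySetD]; exact hcl2 hlast) hj,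
        pv_pyGetD_pySetD _ _ _ _ (by omega) (by rw [PySem.List.length_pySetD]; exact hcl1) hj,
        pv_pyGetD_pySetD _ _ _ _ hc0 hcl hj,
        pv_pyGetD_pySetD _ _ _ _ (by omega) (by rw [PySem.List.length_pySetD]; exact hcl1) (by omega),
        pv_pyGetD_pySetD _ _ _ _ hc0 hcl (by omega),
        pv_pyGetD_pySetD _ _ _ _ hc0 hcl (by omega)]
      simp only [pvD, pvAmt]
      split_ifs <;>
        first
          | (exfalso; omega)
          | (rw [show (c + 1 : Int) = j from by omega]; ring)
          | (rw [show (c - 1 : Int) = j from by omega]; ring)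
          | (rw [show (c : Int) = j from by omega]; ring)
          | ring
    · refine ⟨by simp only [pvB, pvAmt]; rw [if_neg (by omega), if_pos (by omega)]; ring,
        by simp [PySem.List.length_pySetD, hlen], ?_⟩
      intro j hj
      rw [pv_pyGetD_pySetD _ _ _ _ (by omega) (by rw [PySem.List.length_pySetD]; exact hcl1) hj,
        pv_pyGetD_pySetD _ _ _ _ hc0 hcl hj,
        pv_pyGetD_pySetD _ _ _ _ hc0 hcl (by omega)]
      simp only [pvD, pvAmt]
      split_ifs <;>
        first
          | (exfalso; omega)
          | (rw [show (c - 1 : Int) = j from by omega]; ring)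
          | (rw [show (c : Int) = j from by omega]; ring)
          | ring
    · refine ⟨by simp only [pvB, pvAmt]; rw [if_pos (by omega), if_neg (by omega)]; ring,
        by simp [PySem.List.length_pySetD, hlen], ?_⟩
      intro j hj
      rw [pv_pyGetD_pySetD _ _ _ _ (by omega) (by rw [PySem.List.length_pySetD]; exact hcl2 hlast) hj,
        pv_pyGetD_pySetD _ _ _ _ hc0 hcl hj,
        pv_pyGetD_pySetD _ _ _ _ hc0 hcl (by omega)]
      simp only [pvD, pvAmt]
      split_ifs <;>
        first
          | (exfalso; omega)
          | (rw [show (c + 1 : Int) = j from by omega]; ring)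
          | (rw [show (c : Int) = j from by omega]; ring)
          | ring
    · refine ⟨by simp only [pvB, pvAmt]; rw [if_pos (by omega), if_pos (by omega)]; ring,
        by simp [PySem.List.length_pySetD, hlen], ?_⟩
      intro j hj
      rw [pv_pyGetD_pySetD _ _ _ _ hc0 hcl hj]
      simp only [pvD, pvAmt]
      split_ifs <;>
        first
          | (exfalso; omega)
          | (rw [show (c : Int) = j from by omega]; ring)
          | ring

theorem pvScatter_spec (C : Int) (w : List Int) (cols : List Int)
    (hcols : ∀ c ∈ cols, 0 ≤ c ∧ c < C) :
    ∀ st : Int × List Int, st.2.length = C.toNat →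
      (cols.foldl (pvApplyCol C w) st).1 = st.1 + (cols.map (pvB C w)).sum ∧
      (cols.foldl (pvApplyCol C w) st).2.length = C.toNat ∧
      ∀ j : Int, 0 ≤ j →
        PySem.List.pyGetD (cols.foldl (pvApplyCol C w) st).2 j 0 =
          PySem.List.pyGetD st.2 j 0 + (cols.map (fun c => pvD C w j c)).sum := by
  induction cols with
  | nil => intro st hst; simp [hst]
  | cons c t ih =>
    intro st hst
    obtain ⟨h1, h2, h3⟩ := pvApplyCol_spec C w st c (hcols c List.mem_cons_self) hst
    obtain ⟨ih1, ih2, ih3⟩ :=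
      ih (fun x hx => hcols x (List.mem_cons_of_mem _ hx)) (pvApplyCol C w st c) h2
    refine ⟨?_, by simpa using ih2, ?_⟩
    · rw [List.foldl_cons, ih1, h1, List.map_cons, List.sum_cons]; ring
    · intro j hj
      rw [List.foldl_cons, ih3 j hj, h3 j hj, List.map_cons, List.sum_cons]; ring

theorem pv_sum_map_single (cols : List Int) (h : Int → Int) (a : Int) (hnd : cols.Nodup)
    (hz : ∀ c, c ≠ a → h c = 0) :
    (cols.map h).sum = if a ∈ cols then h a else 0 := by
  induction cols with
  | nil => simp
  | cons c t ih =>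
    rw [List.map_cons, List.sum_cons, ih (List.nodup_cons.mp hnd).2]
    by_cases hca : c = a
    · subst hca
      have hnotin : c ∉ t := (List.nodup_cons.mp hnd).1
      simp [hnotin]
    · rw [hz c hca]
      simp only [List.mem_cons]
      by_cases hat : a ∈ t
      · simp [hat]
      · simp only [hat, if_false, or_false]
        rw [if_neg (fun h2 : a = c => hca h2.symm)]
        ring

-- one row: A's scatter loop equals B's gather comprehension
theorem pvScatter_eq_gather (C : Int) (hC : 0 < C) (row : List Char) (st : Int × List Int)
    (hlen : st.2.length = C.toNat) :
    (let cols := pvColsOf row C;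
     if cols.isEmpty then st else cols.foldl (pvApplyCol C st.2) st) =
      pvGatherStep C row st := by
  have hfold : (let cols := pvColsOf row C;
      if cols.isEmpty then st else cols.foldl (pvApplyCol C st.2) st) =
      (pvColsOf row C).foldl (pvApplyCol C st.2) st := by
    by_cases hemp : (pvColsOf row C).isEmpty
    · rw [List.isEmpty_iff] at hemp
      simp [hemp]
    · simp [hemp]
  rw [hfold]
  have hcols : ∀ c ∈ pvColsOf row C, 0 ≤ c ∧ c < C := fun c hc => by
    rw [mem_pvColsOf] at hc; exact ⟨hc.1, hc.2.1⟩
  have hnd := nodup_pvColsOf row C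
  obtain ⟨F1, F2, F3⟩ := pvScatter_spec C st.2 (pvColsOf row C) hcols st hlen
  have hSB : ((pvColsOf row C).map (pvB C st.2)).sum =
      (if PySem.List.pyGetD row 0 ' ' = '^' then PySem.List.pyGetD st.2 0 0 else 0) +
        (if PySem.List.pyGetD row (C - 1) ' ' = '^' then PySem.List.pyGetD st.2 (C - 1) 0
         else 0) := by
    unfold pvB
    rw [PySem.List.sum_map_add_int,
      pv_sum_map_single _ _ 0 hnd (fun c hc => if_neg hc),
      pv_sum_map_single _ _ (C - 1) hnd (fun c hc => if_neg hc)]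
    simp only [mem_pvColsOf, pvAmt, le_refl, hC, true_and,
      show (0 : Int) ≤ C - 1 from by omega, show C - 1 < C from by omega, if_true]
  apply Prod.ext
  · rw [F1, hSB]
    simp only [pvGatherStep]
    ring
  · apply List.ext_getElem
    · rw [F2]
      simp [pvGatherStep, PySem.List.length_pyRange_one]
    · intro k hk1 hk2
      have hkC : (k : Int) < C := by
        rw [F2] at hk1; omega
      have hL : ((pvColsOf row C).foldl (pvApplyCol C st.2) st).2[k] =
          PySem.List.pyGetD ((pvColsOf row C).foldl (pvApplyCol C st.2) st).2 (k : Int) 0 := by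
        rw [PySem.List.pyGetD_natCast, List.getD_eq_getElem _ _ hk1]
      rw [hL, F3 (k : Int) (by positivity)]
      unfold pvD
      rw [PySem.List.sum_map_add_int
          (f := fun c => (if c = (k : Int) then -pvAmt st.2 c else 0) +
            (if 0 < c ∧ c - 1 = (k : Int) then pvAmt st.2 c else 0))
          (g := fun c => if c < C - 1 ∧ c + 1 = (k : Int) then pvAmt st.2 c else 0),
        PySem.List.sum_map_add_int,
        pv_sum_map_single _ _ (k : Int) hnd (fun c hc => if_neg hc),
        pv_sum_map_single _ _ ((k : Int) + 1) hnd (fun c hc => if_neg (by omega)),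
        pv_sum_map_single _ _ ((k : Int) - 1) hnd (fun c hc => if_neg (by omega))]
      simp only [pvGatherStep, List.getElem_map, PySem.List.getElem_pyRange_one, zero_add,
        mem_pvColsOf, pvAmt]
      simp only [show (0 : Int) ≤ (k : Int) from by positivity, true_and, hkC,
        show (0 : Int) ≤ (k : Int) + 1 from by positivity,
        show (k : Int) - 1 < C from by omega,
        show (0 < (k : Int) + 1 ∧ (k : Int) + 1 - 1 = (k : Int)) ↔ True from by
          constructor <;> intro h <;> [trivial; omega],
        show (((k : Int) - 1 < C - 1 ∧ (k : Int) - 1 + 1 = (k : Int)) ↔ (k : Int) < C) from by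
          constructor <;> intro h <;> [omega; exact ⟨by omega, by omega⟩],
        show ((0 : Int) ≤ (k : Int) - 1 ↔ 0 < (k : Int)) from by omega,
        if_true]
      split_ifs <;> ring

theorem pvRowStepB_len (grid : List String) (C : Int) (st : Int × List Int) (r : Int) :
    (pvRowStepB grid C st r).2.length = C.toNat := by
  simp [pvRowStepB, pvGatherStep, PySem.List.length_pyRange_one]

theorem pv_fold_rows_eq (grid : List String) (C : Int) (hC : 0 < C) (spl : List (List Int))
    (hspl : ∀ r : Int, 0 ≤ r → r < (grid.length : Int) →
      PySem.List.pyGetD spl r [] = pvColsOf (PySem.List.pyGetD grid r "").toList C) :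
    ∀ l : List Int, (∀ r ∈ l, 0 ≤ r ∧ r < (grid.length : Int)) →
      ∀ st : Int × List Int, st.2.length = C.toNat →
        l.foldl (pvRowStepA C spl) st = l.foldl (pvRowStepB grid C) st := by
  intro l
  induction l with
  | nil => intro _ st _; rfl
  | cons r t ih =>
    intro hmem st hst
    have hr := hmem r List.mem_cons_self
    have hstep : pvRowStepA C spl st r = pvRowStepB grid C st r := by
      unfold pvRowStepA pvRowStepB
      rw [hspl r hr.1 hr.2]
      exact pvScatter_eq_gather C hC _ st hst
    rw [List.foldl_cons, List.foldl_cons, hstep,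
      ih (fun x hx => hmem x (List.mem_cons_of_mem _ hx)) _ (pvRowStepB_len grid C st r)]

theorem pvWays0_eq (C sc : Int) (h0 : 0 ≤ sc) :
    PySem.List.pySetD (PySem.List.pyRepeat [(0 : Int)] C) sc 1 =
      (PySem.List.pyRange 0 C 1).map (fun j => if j = sc then (1 : Int) else 0) := by
  rw [PySem.List.pyRepeat_singleton, PySem.List.pySetD_of_nonneg _ _ h0]
  apply List.ext_getElem
  · simp [PySem.List.length_pyRange_one]
  · intro k hk1 hk2
    simp only [List.getElem_set, List.getElem_replicate, List.getElem_map,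
      PySem.List.getElem_pyRange_one]
    split_ifs <;> omega

-- ===== VERDICT (by name: the statement is the Claim_ definition above) =====
theorem count_quantum_timelines_spec : Claim_equal_count_quantum_timelines := by
  intro grid _ _
  unfold Spec_count_quantum_timelines count_quantum_timelines count_quantum_timelines_alt
  cases h : pvFindStart grid with
  | none => rfl
  | some p =>
    obtain ⟨sr, sc⟩ := p
    obtain ⟨hsr0, _, hsc0, hscC⟩ := pvFindStart_bounds grid sr sc h
    have hC : 0 < ((PySem.List.pyGetD grid 0 "").toList.length : Int) := by omega
    simp only []
    rw [PySem.List.foldl_append_singleton_eq_map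
      (f := fun r => pvColsOf (PySem.List.pyGetD grid r "").toList
        ((PySem.List.pyGetD grid 0 "").toList.length : Int)), List.nil_append,
      pvWays0_eq _ _ hsc0,
      pv_fold_rows_eq grid _ hC _
        (fun r h1 h2 => PySem.List.pyGetD_map_pyRange_of_nonneg _ _ _ _ h1 h2)
        _
        (fun r hr => by rw [PySem.List.mem_pyRange_one] at hr; exact ⟨by omega, hr.2⟩)
        _
        (by simp [PySem.List.length_pyRange_one])]
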